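-- pv_equiv track=rewrite | github.com/one2clouds/LeetCode_Challenge | Day_10/2379_min_recolors_to_get_k_consecutive_black.py | minimum_recolors_for_black_2
-- ===== SOURCE A (Python) =====
-- def minimum_recolors_for_black_2(my_string, k):
--     left = 0
--     min_num_color_change = k
--     num_color_change = 0
--
--     # go from 0 to end of string
--     for right in range(len(my_string)):
--         # for each index update change color to black if found White
--         if my_string[right] == "W":
--             num_color_change += 1
--
--         # at the k index, check minimum color change as len(my_string)<k, and leftmost value if white then do -1, because we are about to go to next index to check the color
--         if right - left+1 == k:
--             min_num_color_change = min(num_color_change, min_num_color_change)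
--             if my_string[left] == "W":
--                 num_color_change -= 1
--             left += 1
--
--     return min_num_color_change
-- ===== SOURCE B (Python) =====
-- def minimum_recolors_for_black_2(my_string, k):
--     n = len(my_string)
--     prefix = [0]
--     for c in my_string:
--         prefix.append(prefix[-1] + (c == "W"))
--     best = k
--     if 0 <= k <= n:
--         for i in range(n - k + 1):
--             best = min(best, prefix[i + k] - prefix[i])
--     return best
-- ===== Notes on version B (the rewrite author's own statement) =====
-- stated objective: alternative
-- what changed: Replaced the sliding-window left-pointer update (incrementally adding/removing window endpoints) with a prefix-sum table built once and a scan computing each window's white count as prefix[i+k]-prefix[i].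
import Mathlib
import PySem

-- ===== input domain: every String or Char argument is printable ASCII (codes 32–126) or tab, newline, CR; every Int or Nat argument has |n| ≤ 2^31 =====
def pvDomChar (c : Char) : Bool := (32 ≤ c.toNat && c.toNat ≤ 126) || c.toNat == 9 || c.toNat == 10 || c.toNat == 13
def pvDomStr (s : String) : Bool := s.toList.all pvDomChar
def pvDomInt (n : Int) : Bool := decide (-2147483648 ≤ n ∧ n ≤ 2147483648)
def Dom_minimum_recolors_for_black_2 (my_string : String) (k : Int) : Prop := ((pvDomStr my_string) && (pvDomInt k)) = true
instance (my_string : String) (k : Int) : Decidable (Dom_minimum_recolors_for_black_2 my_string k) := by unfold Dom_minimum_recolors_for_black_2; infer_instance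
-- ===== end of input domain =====

-- B replaces A's sliding-window pointer bookkeeping by a prefix-sum table plus a window scan
-- (alternative decomposition, same asymptotic cost); the return values agree on all inputs.

-- ===== PORT A =====
-- the body of A's for-loop; state = (left, min_num_color_change, num_color_change)
def aStep (cs : List Char) (k : Int) (st : Int × Int × Int) (r : Int) : Int × Int × Int :=
  let numc := if PySem.List.pyGetD cs r ' ' = 'W' then st.2.2 + 1 else st.2.2
  if r - st.1 + 1 = k then
    (st.1 + 1, min numc st.2.1, if PySem.List.pyGetD cs st.1 ' ' = 'W' then numc - 1 else numc)
  else
    (st.1, st.2.1, numc)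

def minimum_recolors_for_black_2 (my_string : String) (k : Int) : Int :=
  let cs := my_string.toList
  ((PySem.List.pyRange 0 (cs.length : Int) 1).foldl (aStep cs k) (0, k, 0)).2.1

-- ===== PORT B =====
-- Python's (c == "W") used as an int
def pw (c : Char) : Int := if c = 'W' then 1 else 0

-- the body of B's prefix-building loop: prefix.append(prefix[-1] + (c == "W"))
def bStep (P : List Int) (c : Char) : List Int :=
  P ++ [PySem.List.pyGetD P (-1) 0 + pw c]

def minimum_recolors_for_black_2_alt (my_string : String) (k : Int) : Int :=
  let cs := my_string.toList
  let n : Int := cs.length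
  let pre := cs.foldl bStep ([0] : List Int)
  if 0 ≤ k ∧ k ≤ n then
    (PySem.List.pyRange 0 (n - k + 1) 1).foldl
      (fun best i => min best (PySem.List.pyGetD pre (i + k) 0 - PySem.List.pyGetD pre i 0)) k
  else k

-- ===== PRECONDITION & SPEC =====
def Spec_minimum_recolors_for_black_2 (my_string : String) (k : Int) (out : Int) : Prop := out = minimum_recolors_for_black_2_alt my_string k
instance (my_string : String) (k : Int) (out : Int) : Decidable (Spec_minimum_recolors_for_black_2 my_string k out) := by unfold Spec_minimum_recolors_for_black_2; infer_instance

-- ===== CLAIM (what is proved, stated in full; the proofs are below) =====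
def Claim_equal_minimum_recolors_for_black_2 : Prop := ∀ (my_string : String) (k : Int), Dom_minimum_recolors_for_black_2 my_string k → Spec_minimum_recolors_for_black_2 my_string k (minimum_recolors_for_black_2 my_string k)

-- ===== LEMMAS AND PROOFS =====

-- number of 'W' among the first i characters, as an Int
def Pf (cs : List Char) (i : Nat) : Int := ((cs.take i).map pw).sum

-- the minimum, seeded with kn, of the white counts of all kn-windows lying in the first m characters
def winMin (cs : List Char) (kn : Nat) (m : Nat) : Int :=
  (List.range (m + 1 - kn)).foldl (fun b i => min b (Pf cs (i + kn) - Pf cs i)) (kn : Int)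

theorem Pf_succ (cs : List Char) (m : Nat) (h : m < cs.length) :
    Pf cs (m + 1) = Pf cs m + pw cs[m] := by
  unfold Pf
  rw [List.take_add_one, List.getElem?_eq_getElem h]
  simp
  rw [List.sum_take_succ _ _ (by simpa using h)]
  simp

theorem winMin_succ (cs : List Char) (kn m : Nat) (h : kn ≤ m + 1) :
    winMin cs kn (m + 1) = min (winMin cs kn m) (Pf cs (m + 1) - Pf cs (m + 1 - kn)) := by
  have h2 : m + 1 + 1 - kn = (m + 1 - kn) + 1 := by omega
  have h3 : m + 1 - kn + kn = m + 1 := by omega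
  simp [winMin, h2, List.range_succ, h3]

theorem pw_ite (cs : List Char) (m : Nat) (h : m < cs.length) (x : Int) :
    (if PySem.List.pyGetD cs (m : Int) ' ' = 'W' then x + 1 else x) = x + pw cs[m] := by
  rw [PySem.List.pyGetD_natCast, List.getD_eq_getElem?_getD, List.getElem?_eq_getElem h]
  unfold pw
  split_ifs <;> simp_all

theorem pw_ite_sub (cs : List Char) (l : Nat) (h : l < cs.length) (x : Int) :
    (if PySem.List.pyGetD cs (l : Int) ' ' = 'W' then x - 1 else x) = x - (Pf cs (l + 1) - Pf cs l) := by
  rw [Pf_succ cs l h, PySem.List.pyGetD_natCast, List.getD_eq_getElem?_getD, List.getElem?_eq_getElem h]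
  unfold pw
  split_ifs <;> simp_all

theorem pw_ite0 (cs : List Char) (h : 0 < cs.length) (x : Int) :
    (if PySem.List.pyGetD cs 0 ' ' = 'W' then x - 1 else x) = x - Pf cs 1 := by
  cases cs with
  | nil => simp at h
  | cons c tl =>
      rw [PySem.List.pyGetD_zero_cons]
      simp only [Pf, pw, List.take, List.map, List.sum_cons]
      split_ifs <;> simp_all

-- A's loop invariant for k ≥ 1: before the window fills the state is (0, k, whites seen);
-- afterwards left = m-k+1, the minimum is over all full windows so far, numc counts the current window
theorem A_inv (cs : List Char) (kn : Nat) (hk : 1 ≤ kn) (m : Nat) (hm : m ≤ cs.length) :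
    (PySem.List.pyRange 0 (m : Int) 1).foldl (aStep cs (kn : Int)) (0, (kn : Int), 0) =
      if m < kn then (0, (kn : Int), Pf cs m)
      else (((m - kn + 1 : Nat) : Int), winMin cs kn m, Pf cs m - Pf cs (m - kn + 1)) := by
  induction m with
  | zero =>
      rw [PySem.List.pyRange_one_eq_nil (by omega), if_pos (by omega : (0:Nat) < kn)]
      simp [Pf]
  | succ m ih =>
      have hmlt : m < cs.length := by omega
      have ih := ih (by omega)
      rw [show ((m + 1 : Nat) : Int) = (m : Int) + 1 by push_cast; ring,
          PySem.List.pyRange_one_succ_right (by omega), List.foldl_append, ih]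
      by_cases hcase : m < kn
      · simp only [if_pos hcase]
        by_cases hfull : m + 1 = kn
        · have hcond : (m : Int) - 0 + 1 = (kn : Int) := by omega
          have hnlt : ¬ m + 1 < kn := by omega
          have h0 : (0 : Nat) < cs.length := by omega
          have hwm : winMin cs kn (m + 1) = min ((kn : Int)) (Pf cs (m + 1) - Pf cs 0) := by
            rw [winMin_succ cs kn m (by omega)]
            have e0 : m + 1 - kn = 0 := by omega
            have ewm : winMin cs kn m = (kn : Int) := by
              unfold winMin
              rw [show m + 1 - kn = 0 by omega]
              simp
            rw [e0, ewm]
          simp only [List.foldl_cons, List.foldl_nil, aStep, hcond, if_pos, pw_ite cs m hmlt]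
          rw [if_neg hnlt]
          simp only [Prod.mk.injEq]
          refine ⟨by push_cast; omega, ?_, ?_⟩
          · rw [← Pf_succ cs m hmlt, hwm, min_comm]
            simp [Pf]
          · rw [← Pf_succ cs m hmlt, show m + 1 - kn + 1 = 1 by omega, pw_ite0 cs h0]
        · have hcond : ¬ ((m : Int) - 0 + 1 = (kn : Int)) := by omega
          have hlt : m + 1 < kn := by omega
          simp only [List.foldl_cons, List.foldl_nil, aStep, pw_ite cs m hmlt]
          rw [if_neg hcond]
          simp [hlt, Pf_succ cs m hmlt]
      · have hge : kn ≤ m := by omega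
        simp only [if_neg hcase]
        have hcond : (m : Int) - ((m - kn + 1 : Nat) : Int) + 1 = (kn : Int) := by
          push_cast; omega
        have hleftlt : m - kn + 1 < cs.length := by omega
        have hnlt : ¬ m + 1 < kn := by omega
        simp only [List.foldl_cons, List.foldl_nil, aStep, hcond, if_pos, pw_ite cs m hmlt]
        rw [if_neg hnlt]
        simp only [Prod.mk.injEq]
        have hnum : Pf cs m - Pf cs (m - kn + 1) + pw cs[m] = Pf cs (m + 1) - Pf cs (m - kn + 1) := by
          rw [Pf_succ cs m hmlt]; ring
        refine ⟨by push_cast; omega, ?_, ?_⟩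
        · rw [hnum, winMin_succ cs kn m (by omega), min_comm,
              show m + 1 - kn = m - kn + 1 by omega]
        · rw [hnum, pw_ite_sub cs (m - kn + 1) hleftlt]
          rw [show m - kn + 1 + 1 = m + 1 - kn + 1 by omega]
          ring

-- for k ≤ 0 the trigger r - left + 1 == k never fires, so left and the minimum never change
theorem A_nontrig (cs : List Char) (k : Int) (hk : k ≤ 0) (m : Nat) :
    ∃ x, (PySem.List.pyRange 0 (m : Int) 1).foldl (aStep cs k) (0, k, 0) = (0, k, x) := by
  induction m with
  | zero =>
      rw [PySem.List.pyRange_one_eq_nil (by omega)]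
      exact ⟨0, rfl⟩
  | succ m ih =>
      obtain ⟨x, hx⟩ := ih
      rw [show ((m + 1 : Nat) : Int) = (m : Int) + 1 by push_cast; ring,
          PySem.List.pyRange_one_succ_right (by omega), List.foldl_append, hx]
      have hcond : ¬ ((m : Int) - 0 + 1 = k) := by omega
      refine ⟨if PySem.List.pyGetD cs (m : Int) ' ' = 'W' then x + 1 else x, ?_⟩
      simp only [List.foldl_cons, List.foldl_nil, aStep]
      rw [if_neg hcond]

theorem Pf_append_le (cs : List Char) (c : Char) (i : Nat) (h : i ≤ cs.length) :
    Pf (cs ++ [c]) i = Pf cs i := by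
  simp [Pf, List.take_append_of_le_length h]

theorem Pf_append_full (cs : List Char) (c : Char) :
    Pf (cs ++ [c]) (cs.length + 1) = Pf cs cs.length + pw c := by
  have : (cs ++ [c]).take (cs.length + 1) = cs ++ [c] := by
    apply List.take_of_length_le; simp
  simp [Pf, this, List.take_of_length_le (le_refl cs.length)]

-- B's prefix-building loop produces exactly the table of prefix white-counts
theorem build_pre (cs : List Char) :
    cs.foldl bStep [0] = (List.range (cs.length + 1)).map (fun i => Pf cs i) := by
  induction cs using List.reverseRecOn with
  | nil => simp [Pf]
  | append_singleton cs c ih =>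
      rw [List.foldl_append, ih]
      simp only [List.foldl_cons, List.foldl_nil, bStep]
      have hsplit : (List.range (cs.length + 1)).map (fun i => Pf cs i)
          = (List.range cs.length).map (fun i => Pf cs i) ++ [Pf cs cs.length] := by
        rw [List.range_succ, List.map_append]; simp
      have hlast : PySem.List.pyGetD ((List.range (cs.length + 1)).map (fun i => Pf cs i)) (-1) 0 = Pf cs cs.length := by
        rw [hsplit, PySem.List.pyGetD_neg_one_append_singleton]
      rw [hlast]
      have hlen : (cs ++ [c]).length + 1 = (cs.length + 1) + 1 := by simp
      rw [hlen]
      conv_rhs => rw [List.range_succ, List.map_append]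
      congr 1
      · apply List.map_congr_left
        intro i hi
        rw [List.mem_range] at hi
        exact (Pf_append_le cs c i (by omega)).symm
      · simp [Pf_append_full]

theorem preGet (cs : List Char) (j : Nat) (h : j ≤ cs.length) :
    PySem.List.pyGetD (cs.foldl bStep [0]) (j : Int) 0 = Pf cs j := by
  rw [build_pre, PySem.List.pyGetD_natCast, List.getD_eq_getElem?_getD,
      List.getElem?_map, List.getElem?_range (by omega)]
  simp

theorem winMin_zero (cs : List Char) (m : Nat) : winMin cs 0 m = 0 := by
  unfold winMin
  have h : ∀ l : List Nat, l.foldl (fun b i => min b (Pf cs (i + 0) - Pf cs i)) (((0:Nat)):Int) = 0 := by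
    intro l
    induction l with
    | nil => simp
    | cons x xs ih =>
        rw [List.foldl_cons]
        simpa using ih
  exact h _

-- B's window scan over the prefix table computes the same seeded window minimum
theorem B_fold (cs : List Char) (kn : Nat) (hkn : kn ≤ cs.length) :
    (PySem.List.pyRange 0 ((cs.length : Int) - (kn : Int) + 1) 1).foldl
      (fun b i => min b (PySem.List.pyGetD (cs.foldl bStep [0]) (i + (kn : Int)) 0
                        - PySem.List.pyGetD (cs.foldl bStep [0]) i 0)) (kn : Int)
    = winMin cs kn cs.length := by
  rw [PySem.List.pyRange_one, List.foldl_map]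
  have ht : ((cs.length : Int) - (kn : Int) + 1 - 0).toNat = cs.length + 1 - kn := by omega
  rw [ht]
  unfold winMin
  apply List.foldl_ext
  intro b j hj
  rw [List.mem_range] at hj
  have h1 : (0 : Int) + (j : Int) + (kn : Int) = ((j + kn : Nat) : Int) := by push_cast; ring
  have h2 : (0 : Int) + (j : Int) = ((j : Nat) : Int) := by omega
  rw [h1, h2, preGet cs (j + kn) (by omega), preGet cs j (by omega)]

-- ===== VERDICT (by name: the statement is the Claim_ definition above) =====
theorem minimum_recolors_for_black_2_spec : Claim_equal_minimum_recolors_for_black_2 := by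
  intro s k _dom
  unfold Spec_minimum_recolors_for_black_2 minimum_recolors_for_black_2 minimum_recolors_for_black_2_alt
  dsimp only
  by_cases hneg : k < 0
  · obtain ⟨x, hx⟩ := A_nontrig s.toList k (by omega) s.toList.length
    rw [hx, if_neg (by omega)]
  · have h0 : 0 ≤ k := by omega
    have hk : k = ((k.toNat : Nat) : Int) := by omega
    by_cases hz : k = 0
    · subst hz
      obtain ⟨x, hx⟩ := A_nontrig s.toList 0 (by omega) s.toList.length
      rw [hx, if_pos ⟨by omega, by omega⟩]
      have := B_fold s.toList 0 (by omega)
      simp only [Nat.cast_zero] at this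
      rw [show ((s.toList.length : Int) - 0 + 1) = ((s.toList.length : Int) - (0:Int) + 1) by ring] at this ⊢
      rw [this, winMin_zero]
    · have hk1 : 1 ≤ k.toNat := by omega
      by_cases hbig : (s.toList.length : Int) < k
      · rw [hk]
        rw [A_inv s.toList k.toNat hk1 s.toList.length (le_refl _)]
        rw [if_pos (by omega), if_neg (by omega)]
      · have hle : k.toNat ≤ s.toList.length := by omega
        rw [hk]
        rw [A_inv s.toList k.toNat hk1 s.toList.length (le_refl _)]
        rw [if_neg (by omega), if_pos ⟨by omega, by omega⟩]
        exact (B_fold s.toList k.toNat hle).symm
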